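-- pv_equiv track=rewrite | github.com/mdallanegra/PDF-Extract-Rename-Programs | RenamePyPDF3.py | find_text_after_keyword
-- ===== SOURCE A (Python) =====
-- def find_text_after_keyword(text, keyword):
--     """
--     Find and return text that appears after the specified keyword in the given text.
--
--     :param text: The complete text to search within
--     :param keyword: The keyword to search for
--     :return: Text following the keyword
--     """
--     lines = text.split('\n')
--     for i, line in enumerate(lines):
--         if keyword in line:
--             # Check if the keyword is followed by text on the same line
--             keyword_index = line.find(keyword) + len(keyword)
--             if keyword_index < len(line):
--                 return line[keyword_index:].strip()
--             # Check the next line if the keyword is at the end of the line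
--             if i + 1 < len(lines):
--                 return lines[i + 1].strip()
--     return None
-- ===== SOURCE B (Python) =====
-- def find_text_after_keyword(text, keyword):
--     """
--     Find and return text that appears after the specified keyword in the given text.
--
--     :param text: The complete text to search within
--     :param keyword: The keyword to search for
--     :return: Text following the keyword
--     """
--     pos = text.find(keyword)
--     if pos == -1:
--         return None
--     start = pos + len(keyword)
--     nl = text.find('\n', pos)
--     line_end = nl if nl != -1 else len(text)
--     if start < line_end:
--         return text[start:line_end].strip()
--     if line_end < len(text):
--         nl2 = text.find('\n', line_end + 1)
--         end2 = nl2 if nl2 != -1 else len(text)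
--         return text[line_end + 1:end2].strip()
--     return None
-- ===== Notes on version B (the rewrite author's own statement) =====
-- stated objective: alternative
-- what changed: A splits the text into a list of lines and scans them with enumerate, slicing within the matched line; B never builds the line list: it locates the keyword with one str.find on the raw text and derives the same-line remainder or the next line by direct index/slice arithmetic (find of the next newline).
-- outside the precondition, e.g. on find_text_after_keyword('a\nb', 'a\nb'): A returns None, B returns 'b'
import Mathlib
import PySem

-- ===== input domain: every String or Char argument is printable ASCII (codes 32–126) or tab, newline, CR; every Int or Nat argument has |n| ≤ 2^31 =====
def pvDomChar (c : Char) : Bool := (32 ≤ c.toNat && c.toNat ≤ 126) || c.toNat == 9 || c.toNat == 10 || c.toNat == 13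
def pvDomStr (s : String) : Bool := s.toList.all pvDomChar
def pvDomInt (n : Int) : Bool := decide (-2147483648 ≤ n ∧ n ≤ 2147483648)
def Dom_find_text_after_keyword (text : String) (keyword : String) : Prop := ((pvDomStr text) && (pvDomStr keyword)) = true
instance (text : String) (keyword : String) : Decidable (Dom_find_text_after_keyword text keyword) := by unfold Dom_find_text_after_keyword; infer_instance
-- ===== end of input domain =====

-- B replaces A's split-into-lines + enumerate traversal by direct find/slice index
-- arithmetic on the raw string (objective: alternative decomposition, similar cost).

-- ===== PORT A =====
-- the for-loop over enumerate(lines): structural recursion over the line list;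
-- `i + 1 < len(lines)` is `rest ≠ []`, `lines[i + 1]` is the head of `rest`
def pvLoopA (keyword : List Char) : List (List Char) → Option (List Char)
  | [] => none
  | line :: rest =>
    if PySem.Chars.isIn keyword line then
      -- keyword_index = line.find(keyword) + len(keyword)
      if PySem.Chars.find line keyword + (keyword.length : Int) < (line.length : Int) then
        some (PySem.Chars.strip (PySem.Chars.slice line (some (PySem.Chars.find line keyword + (keyword.length : Int))) none))
      else
        match rest with
        | next :: _ => some (PySem.Chars.strip next)
        | [] => none        -- keyword at the end of the last line: the loop just ends
    else pvLoopA keyword rest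

def find_text_after_keyword (text : String) (keyword : String) : Option String :=
  (pvLoopA keyword.toList (PySem.Chars.splitOn text.toList ['\n'])).map String.ofList

-- ===== PORT B =====
def pvCoreB (s k : List Char) : Option (List Char) :=
  let pos := PySem.Chars.find s k
  if pos = -1 then none
  else
    let start := pos + (k.length : Int)
    let nl := PySem.Chars.findFrom s ['\n'] pos
    let lineEnd := if nl ≠ -1 then nl else (s.length : Int)
    if start < lineEnd then
      some (PySem.Chars.strip (PySem.Chars.slice s (some start) (some lineEnd)))
    else if lineEnd < (s.length : Int) then
      let nl2 := PySem.Chars.findFrom s ['\n'] (lineEnd + 1)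
      let end2 := if nl2 ≠ -1 then nl2 else (s.length : Int)
      some (PySem.Chars.strip (PySem.Chars.slice s (some (lineEnd + 1)) (some end2)))
    else none

def find_text_after_keyword_alt (text : String) (keyword : String) : Option String :=
  (pvCoreB text.toList keyword.toList).map String.ofList

-- ===== PRECONDITION & SPEC =====
-- Pre_ excludes only keywords that contain a newline AND occur in the raw text: there
-- A's line-by-line search can never match (it returns None) while B's raw-string search
-- finds the keyword — a corner where either behaviour is defensible.
def Pre_find_text_after_keyword (text : String) (keyword : String) : Prop :=
  PySem.Str.isIn "\n" keyword = false ∨ PySem.Str.isIn keyword text = false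
instance (text : String) (keyword : String) : Decidable (Pre_find_text_after_keyword text keyword) := by unfold Pre_find_text_after_keyword; infer_instance

def pvWitness_find_text_after_keyword : String × String := ("Name: Alice\nAge: 7", "Name:")

def Spec_find_text_after_keyword (text : String) (keyword : String) (out : Option String) : Prop := out = find_text_after_keyword_alt text keyword
instance (text : String) (keyword : String) (out : Option String) : Decidable (Spec_find_text_after_keyword text keyword out) := by unfold Spec_find_text_after_keyword; infer_instance

-- ===== CLAIM (what is proved, stated in full; the proofs are below) =====
def Claim_equal_find_text_after_keyword : Prop := ∀ (text : String) (keyword : String), Dom_find_text_after_keyword text keyword → Pre_find_text_after_keyword text keyword → Spec_find_text_after_keyword text keyword (find_text_after_keyword text keyword)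

-- ===== LEMMAS AND PROOFS =====

-- reference model of text.split('\n'): glue a line list back together
def pvGlue (c : Char) : List (List Char) → List Char
  | [] => []
  | [l] => l
  | l :: L => l ++ c :: pvGlue c L

theorem pv_go_no_sep (c : Char) (l : List Char) (hc : c ∉ l) :
    ∀ fuel, l.length ≤ fuel → ∀ cur acc,
      PySem.Chars.splitOn.go [c] fuel l cur acc = acc.reverse ++ [cur.reverse ++ l] := by
  induction l with
  | nil => intro fuel _ cur acc; cases fuel <;> simp [PySem.Chars.splitOn.go]
  | cons c1 rest ih =>
    intro fuel hf cur acc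
    cases fuel with
    | zero => simp at hf
    | succ f =>
      have hne : c ≠ c1 := fun h => hc (h ▸ List.mem_cons_self ..)
      rw [show PySem.Chars.splitOn.go [c] (f+1) (c1::rest) cur acc
            = PySem.Chars.splitOn.go [c] f rest (c1::cur) acc by
          simp [PySem.Chars.splitOn.go, List.isPrefixOf, hne]]
      rw [ih (fun h => hc (List.mem_cons_of_mem _ h)) f (by simpa using hf)]
      simp

theorem pv_go_sep (c : Char) (l : List Char) (hc : c ∉ l) :
    ∀ fuel t, l.length + 1 + t.length ≤ fuel → ∀ cur acc,
      PySem.Chars.splitOn.go [c] fuel (l ++ c :: t) cur acc =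
        PySem.Chars.splitOn.go [c] (fuel - (l.length + 1)) t [] ((cur.reverse ++ l) :: acc) := by
  induction l with
  | nil =>
    intro fuel t hf cur acc
    cases fuel with
    | zero => simp at hf
    | succ f =>
      simp only [List.nil_append, List.length_nil, Nat.zero_add, Nat.add_sub_cancel]
      rw [show PySem.Chars.splitOn.go [c] (f+1) (c::t) cur acc
            = PySem.Chars.splitOn.go [c] f t [] (cur.reverse :: acc) by
          simp [PySem.Chars.splitOn.go, List.isPrefixOf]]
      simp
  | cons c1 rest ih =>
    intro fuel t hf cur acc
    cases fuel with
    | zero => simp at hf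
    | succ f =>
      have hne : c ≠ c1 := fun h => hc (h ▸ List.mem_cons_self ..)
      rw [show PySem.Chars.splitOn.go [c] (f+1) ((c1::rest)++c::t) cur acc
            = PySem.Chars.splitOn.go [c] f (rest ++ c::t) (c1::cur) acc by
          simp [PySem.Chars.splitOn.go, List.isPrefixOf, hne]]
      rw [ih (fun h => hc (List.mem_cons_of_mem _ h)) f t (by simp at hf ⊢; omega)]
      simp only [List.reverse_cons, List.append_assoc, List.singleton_append, List.length_cons]
      congr 1
      omega

theorem pv_go_acc (c : Char) :
    ∀ fuel l cur acc, PySem.Chars.splitOn.go [c] fuel l cur acc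
      = acc.reverse ++ PySem.Chars.splitOn.go [c] fuel l cur [] := by
  intro fuel
  induction fuel with
  | zero => intro l cur acc; simp [PySem.Chars.splitOn.go]
  | succ f ih =>
    intro l cur acc
    cases l with
    | nil => simp [PySem.Chars.splitOn.go]
    | cons c1 rest =>
      by_cases h : c = c1
      · subst h
        rw [show PySem.Chars.splitOn.go [c] (f+1) (c::rest) cur acc
              = PySem.Chars.splitOn.go [c] f rest [] (cur.reverse :: acc) by
            simp [PySem.Chars.splitOn.go, List.isPrefixOf]]
        rw [show PySem.Chars.splitOn.go [c] (f+1) (c::rest) cur []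
              = PySem.Chars.splitOn.go [c] f rest [] [cur.reverse] by
            simp [PySem.Chars.splitOn.go, List.isPrefixOf]]
        rw [ih rest [] (cur.reverse :: acc), ih rest [] [cur.reverse]]
        simp
      · rw [show PySem.Chars.splitOn.go [c] (f+1) (c1::rest) cur acc
              = PySem.Chars.splitOn.go [c] f rest (c1::cur) acc by
            simp [PySem.Chars.splitOn.go, List.isPrefixOf, h]]
        rw [show PySem.Chars.splitOn.go [c] (f+1) (c1::rest) cur []
              = PySem.Chars.splitOn.go [c] f rest (c1::cur) [] by
            simp [PySem.Chars.splitOn.go, List.isPrefixOf, h]]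
        exact ih rest (c1::cur) acc

theorem pv_mem_split_first {c : Char} {s : List Char} (h : c ∈ s) :
    ∃ l t, s = l ++ c :: t ∧ c ∉ l := by
  induction s with
  | nil => simp at h
  | cons a s ih =>
    by_cases ha : c = a
    · exact ⟨[], s, by simp [ha], by simp⟩
    · obtain ⟨l, t, rfl, hl⟩ := ih (by rcases List.mem_cons.mp h with h|h; exact absurd h ha; exact h)
      exact ⟨a :: l, t, rfl, by simp [hl]; exact ha⟩

theorem pv_splitOn_no_sep {c : Char} {s : List Char} (hc : c ∉ s) :
    PySem.Chars.splitOn s [c] = [s] := by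
  unfold PySem.Chars.splitOn
  rw [pv_go_no_sep c s hc _ (by omega)]
  simp

theorem pv_splitOn_cons {c : Char} (l t : List Char) (hc : c ∉ l) :
    PySem.Chars.splitOn (l ++ c :: t) [c] = l :: PySem.Chars.splitOn t [c] := by
  unfold PySem.Chars.splitOn
  rw [pv_go_sep c l hc _ t (by simp; omega) [] []]
  rw [pv_go_acc]
  have h : (l ++ c :: t).length + 1 - (l.length + 1) = t.length + 1 := by simp
  rw [h]
  simp

theorem pv_splitOn_spec (c : Char) (s : List Char) :
    pvGlue c (PySem.Chars.splitOn s [c]) = s ∧ PySem.Chars.splitOn s [c] ≠ [] ∧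
      ∀ l ∈ PySem.Chars.splitOn s [c], c ∉ l := by
  induction hn : s.length using Nat.strong_induction_on generalizing s with
  | _ n ih =>
  subst hn
  by_cases hc : c ∈ s
  · obtain ⟨l, t, rfl, hl⟩ := pv_mem_split_first hc
    rw [pv_splitOn_cons l t hl]
    obtain ⟨h1, h2, h3⟩ := ih t.length (by simp; omega) t rfl
    refine ⟨?_, by simp, ?_⟩
    · cases hsp : PySem.Chars.splitOn t [c] with
      | nil => exact absurd hsp h2
      | cons p ps => rw [hsp] at h1; show l ++ c :: pvGlue c (p::ps) = l ++ c :: t; rw [h1]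
    · intro x hx
      rcases List.mem_cons.mp hx with rfl | hx
      · exact hl
      · exact h3 x hx
  · rw [pv_splitOn_no_sep hc]
    exact ⟨rfl, by simp, by simpa using hc⟩

theorem pv_inf {k s : List Char} {i : Nat} (h : k <+: s.drop i) : k <:+: s :=
  List.IsInfix.trans h.isInfix (s.drop_suffix i).isInfix

theorem pv_find_eq_of {s k : List Char} (j : Nat) (h1 : k <+: s.drop j)
    (h2 : ∀ i < j, ¬ k <+: s.drop i) : PySem.Chars.find s k = (j : Int) := by
  have h0 : 0 ≤ PySem.Chars.find s k := (PySem.Chars.find_nonneg_iff s k).mpr (pv_inf h1)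
  obtain ⟨hp, hmin⟩ := PySem.Chars.find_spec h0
  rcases lt_trichotomy (PySem.Chars.find s k).toNat j with h | h | h
  · exact absurd hp (h2 _ h)
  · omega
  · exact absurd h1 (hmin j h)

theorem pv_occ_split {c : Char} {k l t : List Char} (hck : c ∉ k) {i : Nat}
    (h : k <+: (l ++ c :: t).drop i) :
    (i ≤ l.length ∧ k <+: l.drop i) ∨ (l.length + 1 ≤ i ∧ k <+: t.drop (i - (l.length + 1))) := by
  by_cases hi : i ≤ l.length
  · rw [List.drop_append_of_le_length hi] at h
    by_cases hik : i + k.length ≤ l.length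
    · left
      refine ⟨hi, ((List.isPrefix_append_of_length (by simp; omega)).mp h)⟩
    · -- the occurrence would contain the separator: k[l.length - i] = c
      exfalso
      have hlen : l.length - i < k.length := by omega
      have := List.IsPrefix.getElem h hlen
      rw [List.getElem_append_right (by simp)] at this
      simp at this
      exact hck (this ▸ List.getElem_mem _)
  · right
    refine ⟨by omega, ?_⟩
    have : i = l.length + (i - l.length) := by omega
    rw [this, List.drop_length_add_append] at h
    have h2 : i - l.length = (i - (l.length + 1)) + 1 := by omega
    rw [h2, List.drop_succ_cons] at h
    exact h

theorem pv_occ_left {k l : List Char} (t : List Char) {i : Nat} (hi : i ≤ l.length)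
    (h : k <+: l.drop i) : k <+: (l ++ t).drop i := by
  rw [List.drop_append_of_le_length hi]
  exact h.trans (List.prefix_append _ _)

theorem pv_occ_right {k t : List Char} (l : List Char) {j : Nat} (h : k <+: t.drop j) :
    k <+: (l ++ t).drop (l.length + j) := by
  rw [List.drop_length_add_append]
  exact h

theorem pv_infix_singleton {c : Char} {s : List Char} : [c] <:+: s ↔ c ∈ s := by
  constructor
  · intro h; exact (List.singleton_sublist).mp h.sublist
  · intro h
    obtain ⟨u, v, rfl⟩ := List.append_of_mem h
    exact ⟨u, v, by simp⟩

theorem pv_find_sep {c : Char} {l : List Char} (t : List Char) (hc : c ∉ l) :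
    PySem.Chars.find (l ++ c :: t) [c] = (l.length : Int) := by
  apply pv_find_eq_of
  · rw [show l.length = l.length + 0 by omega, List.drop_length_add_append]
    simp
  · intro i hi hpre
    rw [List.drop_append_of_le_length (by omega)] at hpre
    have h0 : (0:Nat) < ([c]:List Char).length := by simp
    have := List.IsPrefix.getElem hpre h0
    rw [List.getElem_append_left (by simp; omega)] at this
    rw [List.getElem_drop] at this
    simp at this
    exact hc (this ▸ List.getElem_mem _)

theorem pv_find_no_sep {c : Char} {s : List Char} (hc : c ∉ s) :
    PySem.Chars.find s [c] = -1 :=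
  (PySem.Chars.find_eq_neg_one_iff s [c]).mpr (fun h => hc (pv_infix_singleton.mp h))

theorem pv_find_append {c : Char} {k l : List Char} (t : List Char)
    (hck : c ∉ k) :
    PySem.Chars.find (l ++ c :: t) k =
      if PySem.Chars.isIn k l then PySem.Chars.find l k
      else if PySem.Chars.isIn k t then (l.length : Int) + 1 + PySem.Chars.find t k
      else -1 := by
  by_cases h1 : PySem.Chars.isIn k l = true
  · rw [if_pos h1]
    have hinf : k <:+: l := (PySem.Chars.isIn_iff_infix k l).mp h1
    have h0 : 0 ≤ PySem.Chars.find l k := (PySem.Chars.find_nonneg_iff l k).mpr hinf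
    obtain ⟨hp, hmin⟩ := PySem.Chars.find_spec h0
    have hple : (PySem.Chars.find l k).toNat ≤ l.length := by
      have := PySem.Chars.find_le_length l k; omega
    rw [pv_find_eq_of (PySem.Chars.find l k).toNat (pv_occ_left _ hple hp) ?_]
    · omega
    · intro i hi hpre
      rcases pv_occ_split hck hpre with ⟨_, hl⟩ | ⟨hge, _⟩
      · exact hmin i hi hl
      · omega
  · rw [if_neg h1]
    by_cases h2 : PySem.Chars.isIn k t = true
    · rw [if_pos h2]
      have hinf : k <:+: t := (PySem.Chars.isIn_iff_infix k t).mp h2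
      have h0 : 0 ≤ PySem.Chars.find t k := (PySem.Chars.find_nonneg_iff t k).mpr hinf
      obtain ⟨hp, hmin⟩ := PySem.Chars.find_spec h0
      have hp' : k <+: (c :: t).drop (1 + (PySem.Chars.find t k).toNat) := by
        rw [show 1 + (PySem.Chars.find t k).toNat = (PySem.Chars.find t k).toNat + 1 by omega,
          List.drop_succ_cons]
        exact hp
      have hstep := pv_occ_right l hp'
      rw [pv_find_eq_of (l.length + (1 + (PySem.Chars.find t k).toNat)) hstep ?_]
      · omega
      · intro i hi hpre
        rcases pv_occ_split hck hpre with ⟨_, hl⟩ | ⟨hge, hpre'⟩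
        · exact h1 ((PySem.Chars.isIn_iff_infix k l).mpr (pv_inf hl))
        · exact hmin _ (by omega) hpre'
    · rw [if_neg h2]
      apply (PySem.Chars.find_eq_neg_one_iff _ k).mpr
      intro hinf
      obtain ⟨j, hj⟩ := (PySem.Chars.exists_prefix_drop_iff_isIn k _).mpr
        ((PySem.Chars.isIn_iff_infix _ _).mpr hinf)
      rcases pv_occ_split hck hj with ⟨_, hl⟩ | ⟨_, ht⟩
      · exact h1 ((PySem.Chars.isIn_iff_infix k l).mpr (pv_inf hl))
      · exact h2 ((PySem.Chars.isIn_iff_infix k t).mpr (pv_inf ht))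

theorem pv_drop_mid (l t : List Char) (c : Char) (j : Nat) :
    (l ++ c :: t).drop (l.length + 1 + j) = t.drop j := by
  have : l ++ c :: t = (l ++ [c]) ++ t := by simp
  rw [this, show l.length + 1 + j = (l ++ [c]).length + j by simp, List.drop_length_add_append]

theorem pv_findFrom_sep {l : List Char} (t : List Char) (hcl : '\n' ∉ l)
    {p : Nat} (hp : p ≤ l.length) :
    PySem.Chars.findFrom (l ++ '\n' :: t) ['\n'] (p : Int) = (l.length : Int) := by
  rw [PySem.Chars.findFrom_natCast _ _ p (by simp; omega)]
  rw [List.drop_append_of_le_length hp]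
  rw [pv_find_sep t (fun h => hcl (List.drop_subset _ _ h))]
  rw [if_neg (by simp)]
  simp
  omega

theorem pv_findFrom_none {s : List Char} (hcs : '\n' ∉ s) {p : Nat} (hp : p ≤ s.length) :
    PySem.Chars.findFrom s ['\n'] (p : Int) = -1 := by
  rw [PySem.Chars.findFrom_natCast _ _ p hp]
  rw [pv_find_no_sep (fun h => hcs (List.drop_subset _ _ h))]
  simp

theorem pv_findFrom_shift (l t sub : List Char) (c : Char) {j : Nat} (hj : j ≤ t.length) :
    PySem.Chars.findFrom (l ++ c :: t) sub ((l.length + 1 + j : Nat) : Int) =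
      if PySem.Chars.findFrom t sub (j : Int) = -1 then -1
      else ((l.length + 1 : Nat) : Int) + PySem.Chars.findFrom t sub (j : Int) := by
  rw [PySem.Chars.findFrom_natCast _ _ _ (by simp; omega)]
  rw [PySem.Chars.findFrom_natCast _ _ _ hj]
  rw [pv_drop_mid]
  by_cases h : PySem.Chars.find (t.drop j) sub = -1
  · simp [h]
  · rw [if_neg h, if_neg h, if_neg (by have := PySem.Chars.neg_one_le_find (t.drop j) sub; omega)]
    omega

theorem pv_slice_shift (l t : List Char) (c : Char) (a b : Nat) :
    PySem.Chars.slice (l ++ c :: t) (some ((l.length + 1 + a : Nat) : Int)) (some ((l.length + 1 + b : Nat) : Int)) =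
      PySem.Chars.slice t (some (a : Int)) (some (b : Int)) := by
  simp only [PySem.Chars.slice_eq_listSlice, PySem.List.slice_natCast]
  rw [pv_drop_mid]
  congr 1
  omega

theorem pv_slice_drop (l : List Char) (p : Nat) :
    PySem.Chars.slice l (some (p : Int)) (some (l.length : Int)) =
      PySem.Chars.slice l (some (p : Int)) none := by
  simp only [PySem.Chars.slice_eq_listSlice, PySem.List.slice_natCast]
  rw [PySem.List.slice_from _ (by exact_mod_cast Int.natCast_nonneg p)]
  rw [Int.toNat_natCast]
  exact List.take_of_length_le (by simp)

theorem pv_coreB_single {k l : List Char} (hcl : '\n' ∉ l) :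
    pvCoreB l k = pvLoopA k [l] := by
  simp only [pvCoreB, pvLoopA]
  by_cases hin : PySem.Chars.isIn k l = true
  · rw [if_pos hin]
    have h0 : 0 ≤ PySem.Chars.find l k :=
      (PySem.Chars.find_nonneg_iff l k).mpr ((PySem.Chars.isIn_iff_infix k l).mp hin)
    have hle := PySem.Chars.find_le_length l k
    have hp : PySem.Chars.find l k = ((PySem.Chars.find l k).toNat : Int) :=
      (Int.toNat_of_nonneg h0).symm
    rw [if_neg (by omega)]
    rw [hp, pv_findFrom_none hcl (by omega)]
    simp only [ne_eq, not_true_eq_false, if_false]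
    by_cases hc : ((PySem.Chars.find l k).toNat : Int) + (k.length : Int) < (l.length : Int)
    · rw [if_pos hc, if_pos hc]
      rw [show ((PySem.Chars.find l k).toNat : Int) + (k.length : Int)
            = (((PySem.Chars.find l k).toNat + k.length : Nat) : Int) by push_cast; ring]
      rw [pv_slice_drop]
    · rw [if_neg hc, if_neg (by omega), if_neg hc]
  · rw [if_neg hin]
    have : PySem.Chars.isIn k l = false := by simpa using hin
    rw [(PySem.Chars.find_eq_neg_one_iff l k).mpr
      (fun h => by rw [(PySem.Chars.isIn_iff_infix k l).mpr h] at this; simp at this)]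
    simp

theorem pv_slice_prefix {l : List Char} (t : List Char) (c : Char) {a : Nat} (ha : a ≤ l.length) :
    PySem.Chars.slice (l ++ c :: t) (some (a : Int)) (some (l.length : Int)) =
      PySem.Chars.slice l (some (a : Int)) none := by
  simp only [PySem.Chars.slice_eq_listSlice, PySem.List.slice_natCast]
  rw [PySem.List.slice_from _ (by exact_mod_cast Int.natCast_nonneg a), Int.toNat_natCast]
  rw [List.drop_append_of_le_length ha]
  rw [List.take_left' (by simp [List.length_drop])]

theorem pv_coreB_head {k l t next : List Char} (hck : '\n' ∉ k) (hcl : '\n' ∉ l)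
    (hin : PySem.Chars.isIn k l = true)
    (ht : t = next ∨ ∃ u, t = next ++ '\n' :: u) (hnext : '\n' ∉ next) :
    pvCoreB (l ++ '\n' :: t) k =
      if PySem.Chars.find l k + (k.length : Int) < (l.length : Int)
      then some (PySem.Chars.strip (PySem.Chars.slice l (some (PySem.Chars.find l k + (k.length : Int))) none))
      else some (PySem.Chars.strip next) := by
  simp only [pvCoreB]
  rw [pv_find_append t hck, if_pos hin]
  have h0 : 0 ≤ PySem.Chars.find l k :=
    (PySem.Chars.find_nonneg_iff l k).mpr ((PySem.Chars.isIn_iff_infix k l).mp hin)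
  have hle := PySem.Chars.find_le_length l k
  have hp : PySem.Chars.find l k = ((PySem.Chars.find l k).toNat : Int) :=
    (Int.toNat_of_nonneg h0).symm
  rw [if_neg (by omega)]
  rw [hp, pv_findFrom_sep t hcl (by omega)]
  rw [if_pos (show ((l.length : Nat) : Int) ≠ -1 by omega)]
  by_cases hc : ((PySem.Chars.find l k).toNat : Int) + (k.length : Int) < (l.length : Int)
  · rw [if_pos hc, if_pos hc]
    rw [show ((PySem.Chars.find l k).toNat : Int) + (k.length : Int)
          = (((PySem.Chars.find l k).toNat + k.length : Nat) : Int) by push_cast; ring]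
    rw [pv_slice_prefix t '\n' (by omega)]
  · rw [if_neg hc, if_pos (by simp), if_neg hc]
    rcases ht with h | ⟨u, h⟩ <;> rw [h]
    · have hnl2 : PySem.Chars.findFrom (l ++ '\n' :: next) ['\n'] (((l.length : Nat) : Int) + 1) = -1 := by
        rw [show ((l.length : Nat) : Int) + 1 = ((l.length + 1 + 0 : Nat) : Int) by push_cast; ring]
        rw [pv_findFrom_shift l next ['\n'] '\n' (by omega)]
        rw [show ((0:Nat):Int) = (0:Int) by simp, PySem.Chars.findFrom_zero, pv_find_no_sep hnext]
        simp
      rw [hnl2]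
      rw [if_neg (by simp)]
      rw [show ((l.length : Nat) : Int) + 1 = ((l.length + 1 + 0 : Nat) : Int) by push_cast; ring]
      rw [show ((l ++ '\n' :: next).length : Int) = ((l.length + 1 + next.length : Nat) : Int) by simp; omega]
      rw [pv_slice_shift]
      simp only [PySem.Chars.slice_eq_listSlice, PySem.List.slice_natCast]
      simp
    · have hnl2 : PySem.Chars.findFrom (l ++ '\n' :: (next ++ '\n' :: u)) ['\n'] (((l.length : Nat) : Int) + 1)
          = ((l.length + 1 : Nat) : Int) + (next.length : Int) := by
        rw [show ((l.length : Nat) : Int) + 1 = ((l.length + 1 + 0 : Nat) : Int) by push_cast; ring]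
        rw [pv_findFrom_shift l (next ++ '\n' :: u) ['\n'] '\n' (by omega)]
        rw [show ((0:Nat):Int) = (0:Int) by simp, PySem.Chars.findFrom_zero, pv_find_sep u hnext]
        rw [if_neg (by omega)]
      rw [hnl2]
      rw [if_pos (show ((l.length + 1 : Nat) : Int) + (next.length : Int) ≠ -1 by omega)]
      rw [show ((l.length : Nat) : Int) + 1 = ((l.length + 1 + 0 : Nat) : Int) by push_cast; ring]
      rw [show ((l.length + 1 : Nat) : Int) + (next.length : Int) = ((l.length + 1 + next.length : Nat) : Int) by push_cast; ring]
      rw [pv_slice_shift]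
      simp only [PySem.Chars.slice_eq_listSlice, PySem.List.slice_natCast]
      rw [List.drop_zero, Nat.sub_zero, List.take_left' rfl]

theorem pv_findFrom_ne_bounds {t sub : List Char} {j : Nat} (hj : j ≤ t.length)
    (h : PySem.Chars.findFrom t sub (j : Int) ≠ -1) :
    (j : Int) ≤ PySem.Chars.findFrom t sub (j : Int) ∧
      PySem.Chars.findFrom t sub (j : Int) ≤ (t.length : Int) := by
  rw [PySem.Chars.findFrom_natCast _ _ _ hj] at h ⊢
  by_cases hd : PySem.Chars.find (t.drop j) sub = -1
  · simp [hd] at h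
  · have h1 := PySem.Chars.neg_one_le_find (t.drop j) sub
    have h2 := PySem.Chars.find_le_length (t.drop j) sub
    rw [List.length_drop] at h2
    rw [if_neg hd]
    constructor <;> omega

theorem pv_coreB_shift {k l : List Char} (t : List Char) (hck : '\n' ∉ k)
    (hnot : PySem.Chars.isIn k l = false) :
    pvCoreB (l ++ '\n' :: t) k = pvCoreB t k := by
  simp only [pvCoreB]
  rw [pv_find_append t hck, hnot]
  simp only [Bool.false_eq_true, if_false]
  by_cases h2 : PySem.Chars.isIn k t = true
  · simp only [h2, if_true]
    have h0t : 0 ≤ PySem.Chars.find t k :=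
      (PySem.Chars.find_nonneg_iff t k).mpr ((PySem.Chars.isIn_iff_infix k t).mp h2)
    have hlet := PySem.Chars.find_le_length t k
    have hpt : PySem.Chars.find t k = ((PySem.Chars.find t k).toNat : Int) :=
      (Int.toNat_of_nonneg h0t).symm
    set p' : Nat := (PySem.Chars.find t k).toNat with hp'
    have hcast : (l.length : Int) + 1 + PySem.Chars.find t k = ((l.length + 1 + p' : Nat) : Int) := by
      rw [hpt]; push_cast; ring
    rw [hcast, hpt]
    rw [if_neg (show ¬(((l.length + 1 + p' : Nat) : Int) = -1) by omega)]
    rw [if_neg (show ¬(((p' : Nat) : Int) = -1) by omega)]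
    rw [pv_findFrom_shift l t ['\n'] '\n' (show p' ≤ t.length by omega)]
    set F := PySem.Chars.findFrom t ['\n'] ((p' : Nat) : Int) with hF
    have hslen : ((l ++ '\n' :: t).length : Int) = ((l.length + 1 + t.length : Nat) : Int) := by
      simp; omega
    rw [hslen]
    by_cases hFn : F = -1
    · rw [if_pos hFn, hFn]
      rw [if_neg (show ¬((-1 : Int) ≠ -1) by simp)]
      rw [if_neg (show ¬((-1 : Int) ≠ -1) by simp)]
      by_cases hc : ((p' : Nat) : Int) + (k.length : Int) < (t.length : Int)
      · rw [if_pos (show (((l.length + 1 + p' : Nat) : Int)) + (k.length : Int)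
              < ((l.length + 1 + t.length : Nat) : Int) by push_cast at hc ⊢; omega), if_pos hc]
        rw [show (((l.length + 1 + p' : Nat) : Int)) + (k.length : Int)
              = ((l.length + 1 + (p' + k.length) : Nat) : Int) by push_cast; ring]
        rw [pv_slice_shift]
        rw [show ((p' + k.length : Nat) : Int) = ((p' : Nat) : Int) + (k.length : Int) by push_cast; ring]
      · rw [if_neg (show ¬((((l.length + 1 + p' : Nat) : Int)) + (k.length : Int)
              < ((l.length + 1 + t.length : Nat) : Int)) by push_cast at hc ⊢; omega), if_neg hc]
        rw [if_neg (show ¬(((l.length + 1 + t.length : Nat) : Int) < ((l.length + 1 + t.length : Nat) : Int)) by omega)]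
        rw [if_neg (show ¬((t.length : Int) < (t.length : Int)) by omega)]
    · have hFb := pv_findFrom_ne_bounds (sub := ['\n']) (show p' ≤ t.length by omega) (by rw [← hF]; exact hFn)
      rw [← hF] at hFb
      have hFnn : 0 ≤ F := le_trans (by positivity) hFb.1
      have hFcast : F = ((F.toNat : Nat) : Int) := (Int.toNat_of_nonneg hFnn).symm
      rw [if_neg hFn]
      rw [if_pos (show (((l.length + 1 : Nat) : Int) + F) ≠ -1 by push_cast at hFb ⊢; omega)]
      rw [if_pos hFn]
      by_cases hc : ((p' : Nat) : Int) + (k.length : Int) < F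
      · rw [if_pos (show (((l.length + 1 + p' : Nat) : Int)) + (k.length : Int)
              < ((l.length + 1 : Nat) : Int) + F by push_cast at hc ⊢; omega), if_pos hc]
        rw [show (((l.length + 1 + p' : Nat) : Int)) + (k.length : Int)
              = ((l.length + 1 + (p' + k.length) : Nat) : Int) by push_cast; ring]
        rw [show ((l.length + 1 : Nat) : Int) + F = ((l.length + 1 + F.toNat : Nat) : Int) by
          push_cast; omega]
        rw [pv_slice_shift]
        rw [show ((p' + k.length : Nat) : Int) = ((p' : Nat) : Int) + (k.length : Int) by push_cast; ring]
        rw [show ((F.toNat : Nat) : Int) = F from hFcast.symm]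
      · rw [if_neg (show ¬((((l.length + 1 + p' : Nat) : Int)) + (k.length : Int)
              < ((l.length + 1 : Nat) : Int) + F) by push_cast at hc ⊢; omega), if_neg hc]
        by_cases hc2 : F < (t.length : Int)
        · rw [if_pos (show ((l.length + 1 : Nat) : Int) + F < ((l.length + 1 + t.length : Nat) : Int) by
              push_cast at hc2 ⊢; omega), if_pos hc2]
          rw [show ((l.length + 1 : Nat) : Int) + F + 1 = ((l.length + 1 + (F.toNat + 1) : Nat) : Int) by
            push_cast; omega]
          rw [show F + 1 = ((F.toNat + 1 : Nat) : Int) by push_cast; omega]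
          rw [pv_findFrom_shift l t ['\n'] '\n' (show F.toNat + 1 ≤ t.length by omega)]
          set F2 := PySem.Chars.findFrom t ['\n'] ((F.toNat + 1 : Nat) : Int) with hF2def
          by_cases hF2 : F2 = -1
          · rw [if_pos hF2, hF2]
            rw [if_neg (show ¬((-1 : Int) ≠ -1) by simp)]
            rw [if_neg (show ¬((-1 : Int) ≠ -1) by simp)]
            rw [pv_slice_shift]
          · have hF2b := pv_findFrom_ne_bounds (sub := ['\n']) (show F.toNat + 1 ≤ t.length by omega) (by rw [← hF2def]; exact hF2)
            rw [← hF2def] at hF2b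
            have hF2nn : 0 ≤ F2 := le_trans (by positivity) hF2b.1
            have hF2cast : F2 = ((F2.toNat : Nat) : Int) := (Int.toNat_of_nonneg hF2nn).symm
            rw [if_neg hF2]
            rw [if_pos (show (((l.length + 1 : Nat) : Int) + F2) ≠ -1 by push_cast at hF2b ⊢; omega)]
            rw [if_pos hF2]
            rw [show ((l.length + 1 : Nat) : Int) + F2 = ((l.length + 1 + F2.toNat : Nat) : Int) by
              push_cast; omega]
            rw [pv_slice_shift]
            rw [show ((F2.toNat : Nat) : Int) = F2 from hF2cast.symm]
        · rw [if_neg (show ¬(((l.length + 1 : Nat) : Int) + F < ((l.length + 1 + t.length : Nat) : Int)) by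
              push_cast at hc2 ⊢; omega), if_neg hc2]
  · have h2' : PySem.Chars.isIn k t = false := by simpa using h2
    simp only [h2', Bool.false_eq_true, if_false]
    have hft : PySem.Chars.find t k = -1 :=
      (PySem.Chars.find_eq_neg_one_iff t k).mpr
        (fun h => by rw [(PySem.Chars.isIn_iff_infix k t).mpr h] at h2'; simp at h2')
    rw [hft]
    simp

theorem pv_main {k : List Char} (hck : '\n' ∉ k) :
    ∀ L : List (List Char), L ≠ [] → (∀ l ∈ L, '\n' ∉ l) →
      pvLoopA k L = pvCoreB (pvGlue '\n' L) k := by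
  intro L
  induction L with
  | nil => intro h; exact absurd rfl h
  | cons l L' ih =>
    intro _ hfree
    have hcl : '\n' ∉ l := hfree l (by simp)
    cases L' with
    | nil => exact (pv_coreB_single hcl).symm
    | cons next L'' =>
      have hnext : '\n' ∉ next := hfree next (by simp)
      rw [show pvGlue '\n' (l :: next :: L'') = l ++ '\n' :: pvGlue '\n' (next :: L'') from rfl]
      by_cases hin : PySem.Chars.isIn k l = true
      · have ht : pvGlue '\n' (next :: L'') = next ∨
            ∃ u, pvGlue '\n' (next :: L'') = next ++ '\n' :: u := by
          cases L'' with
          | nil => exact Or.inl rfl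
          | cons m M => exact Or.inr ⟨pvGlue '\n' (m :: M), rfl⟩
        rw [pv_coreB_head hck hcl hin ht hnext]
        simp only [pvLoopA, hin, if_true]
      · have hnot : PySem.Chars.isIn k l = false := by simpa using hin
        rw [pv_coreB_shift _ hck hnot]
        rw [show pvLoopA k (l :: next :: L'') = pvLoopA k (next :: L'') by simp [pvLoopA, hnot]]
        exact ih (by simp) (fun x hx => hfree x (List.mem_cons_of_mem _ hx))

-- A's loop finds nothing when no line contains the keyword
theorem pv_loopA_none {k : List Char} :
    ∀ L, (∀ l ∈ L, PySem.Chars.isIn k l = false) → pvLoopA k L = none := by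
  intro L h
  induction L with
  | nil => rfl
  | cons l L' ih =>
    simp only [pvLoopA, h l (by simp), Bool.false_eq_true, if_false]
    exact ih (fun x hx => h x (List.mem_cons_of_mem _ hx))

theorem pv_mem_glue_infix {c : Char} {l : List Char} : ∀ L, l ∈ L → l <:+: pvGlue c L := by
  intro L
  induction L with
  | nil => simp
  | cons m L' ih =>
    intro h
    cases L' with
    | nil =>
      rw [show l = m by simpa using h]
      exact List.infix_refl m
    | cons m2 M =>
      rcases List.mem_cons.mp h with rfl | h2
      · exact ⟨[], c :: pvGlue c (m2 :: M), by simp [pvGlue]⟩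
      · exact (ih h2).trans ⟨m ++ [c], [], by simp [pvGlue]⟩

-- ===== VERDICT (by name: the statement is the Claim_ definition above) =====
theorem find_text_after_keyword_spec : Claim_equal_find_text_after_keyword := by
  intro text keyword _ hpre
  unfold Spec_find_text_after_keyword find_text_after_keyword find_text_after_keyword_alt
  unfold Pre_find_text_after_keyword at hpre
  rcases hpre with hpre | hpre
  · have hck : '\n' ∉ keyword.toList := by
      simp only [PySem.Str.isIn_eq] at hpre
      have h2 := (PySem.Chars.isIn_eq_false_iff _ _).mp hpre
      intro hmem
      exact h2 (pv_infix_singleton.mpr (by simpa using hmem))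
    obtain ⟨hglue, hne, hfree⟩ := pv_splitOn_spec '\n' text.toList
    rw [pv_main hck _ hne hfree, hglue]
  · -- the keyword does not occur in the raw text: both sides return none
    simp only [PySem.Str.isIn_eq] at hpre
    have hninf : ¬ keyword.toList <:+: text.toList :=
      (PySem.Chars.isIn_eq_false_iff _ _).mp hpre
    have hfalse : ∀ l ∈ PySem.Chars.splitOn text.toList ['\n'],
        PySem.Chars.isIn keyword.toList l = false := by
      intro l hl
      rw [← Bool.not_eq_true]
      intro hx
      have hlinf : l <:+: text.toList := by
        have := pv_mem_glue_infix (c := '\n') _ hl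
        rwa [(pv_splitOn_spec '\n' text.toList).1] at this
      exact hninf (((PySem.Chars.isIn_iff_infix _ _).mp hx).trans hlinf)
    rw [pv_loopA_none _ hfalse]
    have hf : PySem.Chars.find text.toList keyword.toList = -1 :=
      (PySem.Chars.find_eq_neg_one_iff _ _).mpr hninf
    simp [pvCoreB, hf]
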